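-- pv_equiv track=rewrite | github.com/akhfadhil/Interpretative-Structural-Modelling | ISMt2.py | input_to_mirror
-- ===== SOURCE A (Python) =====
-- def create_matrix(ordo, string_data):
--     matrix = [['' for _ in range(ordo)] for _ in range(ordo)]
--     pattern_index = 0
--
--     for i in range(ordo):
--         matrix[i][ordo - 1 - i] = 'X'
--         for j in range(ordo - 1 - i):
--             matrix[i][j] = string_data[pattern_index]
--             pattern_index = (pattern_index + 1) % len(string_data)
--
--     return matrix
--
-- def input_to_mirror(string_data, ordo):
--     list_data = string_data.split()
--     # list_data = list(string_data)
--     index = 0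
--
--     # Mengisi segitiga atas matrix
--     matrix = create_matrix(ordo, list_data)
--
--     # Mengisi segitiga bawah matrix otomatis
--     for i in range(ordo-1):
--         for j in range(ordo):
--             if matrix[i][j] == 'V':
--                 matrix[ordo - 1 - j][ordo - 1 - i] = 'A'
--             elif matrix[i][j] == 'A':
--                 matrix[ordo - 1 - j][ordo - 1 - i] = 'V'
--             elif matrix[i][j] == 'X':
--                 matrix[ordo - 1 - j][ordo - 1 - i] = 'X'
--             elif matrix[i][j] == 'O':
--                 matrix[ordo - 1 - j][ordo - 1 - i] = 'O'
--
--             if j == [ordo - 1 - i]: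
--                 break
--
--     full_str = ''
--     for i in range(len(matrix)):
--         full_str = full_str + ' '.join(matrix[i]) + ' '
--
--     return full_str
-- ===== SOURCE B (Python) =====
-- def input_to_mirror(string_data, ordo):
--     words = string_data.split()
--     mirror = {'V': 'A', 'A': 'V', 'X': 'X', 'O': 'O'}
--
--     def upper(i, j):
--         # value of an upper-triangle/diagonal cell (i, j), j <= ordo-1-i
--         if j == ordo - 1 - i:
--             return 'X'
--         prefix = i * (ordo - 1) - i * (i - 1) // 2
--         return words[(prefix + j) % len(words)]
--
--     def cell(i, j):
--         if j <= ordo - 1 - i: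
--             return upper(i, j)
--         return mirror.get(upper(ordo - 1 - j, ordo - 1 - i), '')
--
--     return ''.join(' '.join(cell(i, j) for j in range(ordo)) + ' ' for i in range(ordo))
-- ===== Notes on version B (the rewrite author's own statement) =====
-- stated objective: simpler
-- what changed: B computes every output cell directly from its (i,j) position (closed-form cycled word index for the upper triangle, one mirror-dict lookup of the source cell for the lower triangle) instead of A's build-then-rescan of a mutable matrix whose mirror pass re-reads its own writes.
import Mathlib
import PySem

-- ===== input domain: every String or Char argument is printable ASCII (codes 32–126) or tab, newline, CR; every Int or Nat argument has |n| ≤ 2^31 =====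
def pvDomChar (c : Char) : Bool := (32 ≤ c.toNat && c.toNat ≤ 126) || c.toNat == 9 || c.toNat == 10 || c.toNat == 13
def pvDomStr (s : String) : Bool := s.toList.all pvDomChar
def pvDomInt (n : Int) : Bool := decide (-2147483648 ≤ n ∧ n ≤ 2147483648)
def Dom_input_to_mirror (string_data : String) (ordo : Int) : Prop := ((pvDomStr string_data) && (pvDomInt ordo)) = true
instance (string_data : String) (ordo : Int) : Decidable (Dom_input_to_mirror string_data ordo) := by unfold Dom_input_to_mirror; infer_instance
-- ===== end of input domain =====

-- B replaces A's build-then-rescan of a mutable matrix (whose mirror pass re-reads its own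
-- writes) by a direct per-cell computation: closed-form cycled word index for the upper
-- triangle, one mirror lookup of the source cell for the lower triangle (objective: simpler).

-- ===== PORT A =====
-- matrix[i][j] = v / matrix[i][j]; wherever A executes them the indices are in range, so
-- set/getD at Nat indices are exact.
def pvSet2 (m : List (List String)) (i j : Nat) (v : String) : List (List String) :=
  m.set i ((m.getD i []).set j v)

def pvGet2 (m : List (List String)) (i j : Nat) : String :=
  (m.getD i []).getD j ""

-- body of create_matrix's inner loop: matrix[i][j] = string_data[pattern_index];
-- pattern_index = (pattern_index+1) % len(string_data).  Whenever this body runs, Pre_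
-- guarantees 0 < len(string_data) (Python raises IndexError there exactly when the list is
-- empty, which Pre_ excludes), so getD and Nat % are exact.
def pvA_fillCell (ws : List String) (st : List (List String) × Nat) (i j : Nat) :
    List (List String) × Nat :=
  (pvSet2 st.1 i j (ws.getD st.2 ""), (st.2 + 1) % ws.length)

-- one iteration of create_matrix's outer loop (row i): the 'X' on the anti-diagonal, then
-- the inner loop over j in range(ordo-1-i)
def pvA_fillRow (n : Nat) (ws : List String) (st : List (List String) × Nat) (i : Nat) :
    List (List String) × Nat :=
  let st1 := (pvSet2 st.1 i (n - 1 - i) "X", st.2)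
  (List.range (n - 1 - i)).foldl (fun st2 j => pvA_fillCell ws st2 i j) st1

-- create_matrix(ordo, string_data); n = ordo.toNat is exact: every range is empty for
-- ordo < 0 and all indices ordo-1-i are nonnegative where executed
def create_matrix (n : Nat) (ws : List String) : List (List String) :=
  ((List.range n).foldl (pvA_fillRow n ws) (List.replicate n (List.replicate n ""), 0)).1

-- body of the mirror loop: the elif-chain on matrix[i][j].  (Python's 'if j == [ordo-1-i]:
-- break' compares an int with a list, is always False, and never breaks: nothing to port.)
def pvA_mirrorStep (n : Nat) (m : List (List String)) (i j : Nat) : List (List String) :=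
  let c := pvGet2 m i j
  if c = "V" then pvSet2 m (n - 1 - j) (n - 1 - i) "A"
  else if c = "A" then pvSet2 m (n - 1 - j) (n - 1 - i) "V"
  else if c = "X" then pvSet2 m (n - 1 - j) (n - 1 - i) "X"
  else if c = "O" then pvSet2 m (n - 1 - j) (n - 1 - i) "O"
  else m

-- one iteration of the mirror loop's outer loop: for j in range(ordo)
def pvA_mirrorRow (n : Nat) (m : List (List String)) (i : Nat) : List (List String) :=
  (List.range n).foldl (fun m j => pvA_mirrorStep n m i j) m

def input_to_mirror (string_data : String) (ordo : Int) : String :=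
  let list_data := PySem.Str.split₀ string_data
  let n := ordo.toNat      -- all of A's ranges are over ordo, ordo-1, …: empty for ordo ≤ 0
  let matrix := create_matrix n list_data
  let matrix := (List.range (n - 1)).foldl (fun m i => pvA_mirrorRow n m i) matrix
  (List.range matrix.length).foldl
    (fun s i => s ++ PySem.Str.join " " (matrix.getD i []) ++ " ") ""

-- ===== PORT B =====
-- the dict literal {'V': 'A', 'A': 'V', 'X': 'X', 'O': 'O'}
def pvB_mirror : PySem.Dict String String :=
  PySem.Dict.mk [("V", "A"), ("A", "V"), ("X", "X"), ("O", "O")]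

-- helper upper(i, j): value of an upper-triangle/diagonal cell.  words[k] with
-- k = (prefix+j) % len(words): pyGet?.getD is exact under Pre_ (Python raises exactly when
-- words == [], excluded by Pre_ whenever this word branch runs).
def pvB_upper (words : List String) (ordo : Int) (i j : Int) : String :=
  if j = ordo - 1 - i then "X"
  else
    (PySem.List.pyGet? words
      (PySem.Int.mod (i * (ordo - 1) - PySem.Int.floordiv (i * (i - 1)) 2 + j)
        ((words.length : Int)))).getD ""

-- helper cell(i, j)
def pvB_cell (words : List String) (ordo : Int) (i j : Int) : String :=
  if j ≤ ordo - 1 - i then pvB_upper words ordo i j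
  else pvB_mirror.getD (pvB_upper words ordo (ordo - 1 - j) (ordo - 1 - i)) ""

def input_to_mirror_alt (string_data : String) (ordo : Int) : String :=
  let words := PySem.Str.split₀ string_data
  String.join ((PySem.List.pyRange 0 ordo 1).map (fun i =>
    PySem.Str.join " " ((PySem.List.pyRange 0 ordo 1).map (fun j => pvB_cell words ordo i j))
      ++ " "))

-- ===== PRECONDITION & SPEC =====
-- Pre_ excludes exactly the inputs where A raises IndexError: ordo ≥ 2 together with a
-- string_data that has no whitespace-separated words (string_data.split() == []).
def Pre_input_to_mirror (string_data : String) (ordo : Int) : Prop :=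
  ordo ≤ 1 ∨ PySem.Str.split₀ string_data ≠ []
instance (string_data : String) (ordo : Int) : Decidable (Pre_input_to_mirror string_data ordo) := by
  unfold Pre_input_to_mirror; infer_instance

def pvWitness_input_to_mirror : String × Int := ("V A O", 3)

def Spec_input_to_mirror (string_data : String) (ordo : Int) (out : String) : Prop :=
  out = input_to_mirror_alt string_data ordo
instance (string_data : String) (ordo : Int) (out : String) : Decidable (Spec_input_to_mirror string_data ordo out) := by
  unfold Spec_input_to_mirror; infer_instance

-- ===== CLAIM (what is proved, stated in full; the proofs are below) =====
def Claim_equal_input_to_mirror : Prop := ∀ (string_data : String) (ordo : Int), Dom_input_to_mirror string_data ordo → Pre_input_to_mirror string_data ordo → Spec_input_to_mirror string_data ordo (input_to_mirror string_data ordo)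

-- ===== LEMMAS AND PROOFS =====

-- number of pattern cells strictly above the anti-diagonal in rows 0..i-1
def pvPref (n : Nat) : Nat → Nat
  | 0 => 0
  | i + 1 => pvPref n i + (n - 1 - i)

-- the matrix produced by create_matrix, cell by cell
def pvUpC (n : Nat) (ws : List String) (i j : Nat) : String :=
  if j = n - 1 - i then "X"
  else if j < n - 1 - i then ws.getD ((pvPref n i + j) % ws.length) ""
  else ""

-- the value A's elif-chain writes for a read value (empty = no write)
def pvMirC (s : String) : String :=
  if s = "V" then "A" else if s = "A" then "V"
  else if s = "X" then "X" else if s = "O" then "O" else ""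

-- the matrix after the whole mirror loop
def pvFinC (n : Nat) (ws : List String) (i j : Nat) : String :=
  if n - 1 - i < j then pvMirC (pvUpC n ws (n - 1 - j) (n - 1 - i)) else pvUpC n ws i j

-- the matrix after k full outer iterations of the mirror loop
def pvMidC (n : Nat) (ws : List String) (k i j : Nat) : String :=
  if n - 1 - i < j ∧ n - 1 - j < k then pvMirC (pvUpC n ws (n - 1 - j) (n - 1 - i))
  else pvUpC n ws i j

-- the matrix after k rows of the mirror loop plus t steps of row i
def pvMidC2 (n : Nat) (ws : List String) (i t a b : Nat) : String :=
  if n - 1 - a < b ∧ (n - 1 - b < i ∨ (n - 1 - b = i ∧ n - 1 - a < t)) then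
    pvMirC (pvUpC n ws (n - 1 - b) (n - 1 - a))
  else pvUpC n ws a b

-- "the n×n matrix m holds f"
def pvMEq (m : List (List String)) (n : Nat) (f : Nat → Nat → String) : Prop :=
  m.length = n ∧ (∀ i, i < n → (m.getD i []).length = n) ∧
    ∀ i j, i < n → j < n → pvGet2 m i j = f i j

theorem pvMEq_congr {m : List (List String)} {n : Nat} {f g : Nat → Nat → String}
    (h : pvMEq m n f) (hfg : ∀ i j, i < n → j < n → f i j = g i j) : pvMEq m n g := by
  exact ⟨h.1, h.2.1, fun i j hi hj => (h.2.2 i j hi hj).trans (hfg i j hi hj)⟩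

theorem pvMEq_set {m : List (List String)} {n : Nat} {f : Nat → Nat → String}
    (h : pvMEq m n f) {i j : Nat} (hi : i < n) (hj : j < n) (v : String) :
    pvMEq (pvSet2 m i j v) n (fun a b => if a = i ∧ b = j then v else f a b) := by
  obtain ⟨hlen, hrow, hcell⟩ := h
  have hi' : i < m.length := hlen ▸ hi
  have hgetDi : ∀ a, a < n → (pvSet2 m i j v).getD a [] =
      if a = i then (m.getD i []).set j v else m.getD a [] := by
    intro a ha
    by_cases hai : a = i
    · subst hai
      simp [pvSet2, List.getD_eq_getElem?_getD, List.getElem?_set_self, hi']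
    · simp [pvSet2, List.getD_eq_getElem?_getD,
        List.getElem?_set_ne (fun h => hai h.symm), hai]
  have hrowlen : ∀ a, a < n → ((pvSet2 m i j v).getD a []).length = n := by
    intro a ha
    rw [hgetDi a ha]
    by_cases hai : a = i
    · simpa [hai] using hrow i hi
    · simpa [hai] using hrow a ha
  refine ⟨by simp [pvSet2, hlen], hrowlen, ?_⟩
  intro a b ha hb
  unfold pvGet2
  rw [hgetDi a ha]
  by_cases hai : a = i
  · subst hai
    have hj' : j < (m.getD a []).length := (hrow a ha) ▸ hj
    by_cases hbj : b = j
    · subst hbj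
      simp only [List.getD_eq_getElem?_getD] at hj' ⊢
      simp [List.getElem?_set_self hj']
    · have := hcell a b ha hb
      simp only [pvGet2, List.getD_eq_getElem?_getD] at this
      simp only [List.getD_eq_getElem?_getD, eq_self_iff_true, true_and, if_true, hbj,
        if_false]
      rw [List.getElem?_set_ne (fun h : j = b => hbj h.symm)]
      exact this
  · have := hcell a b ha hb
    simpa [pvGet2, hai] using this

theorem pvMEq_init (n : Nat) :
    pvMEq (List.replicate n (List.replicate n "")) n (fun _ _ => "") := by
  refine ⟨by simp, ?_, ?_⟩
  · intro i hi
    simp [List.getD_eq_getElem?_getD, List.getElem?_replicate, hi]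
  · intro i j hi hj
    simp [pvGet2, List.getD_eq_getElem?_getD, List.getElem?_replicate, hi, hj]

-- characterization of create_matrix
theorem pvModSucc (a L : Nat) : (a % L + 1) % L = (a + 1) % L := by
  conv_rhs => rw [Nat.add_mod]
  rw [Nat.add_mod (a % L) 1 L, Nat.mod_mod_of_dvd a dvd_rfl]

theorem create_matrix_char (n : Nat) (ws : List String)
    (hL : 0 < ws.length ∨ n ≤ 1) : pvMEq (create_matrix n ws) n (pvUpC n ws) := by
  -- one outer iteration (row k)
  have row : ∀ k, k < n → ∀ st : List (List String) × Nat,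
      pvMEq st.1 n (fun i j => if i < k then pvUpC n ws i j else "") →
      st.2 = pvPref n k % ws.length →
      pvMEq (pvA_fillRow n ws st k).1 n
          (fun i j => if i < k + 1 then pvUpC n ws i j else "") ∧
        (pvA_fillRow n ws st k).2 = pvPref n (k + 1) % ws.length := by
    intro k hk st hm hp
    have hdiag : pvMEq (pvSet2 st.1 k (n - 1 - k) "X") n
        (fun i j => if i < k then pvUpC n ws i j
          else if i = k ∧ j = n - 1 - k then "X" else "") := by
      refine pvMEq_congr (pvMEq_set hm hk (by omega) "X") ?_
      intro a b ha hb
      split_ifs <;> first | rfl | omega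
    have inner : ∀ t, t ≤ n - 1 - k →
        pvMEq ((List.range t).foldl (fun st2 j => pvA_fillCell ws st2 k j)
            (pvSet2 st.1 k (n - 1 - k) "X", st.2)).1 n
          (fun i j => if i < k then pvUpC n ws i j
            else if i = k then
              (if j = n - 1 - k then "X"
               else if j < t then ws.getD ((pvPref n k + j) % ws.length) "" else "")
            else "") ∧
        ((List.range t).foldl (fun st2 j => pvA_fillCell ws st2 k j)
            (pvSet2 st.1 k (n - 1 - k) "X", st.2)).2 = (pvPref n k + t) % ws.length := by
      intro t
      induction t with
      | zero =>
        intro _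
        refine ⟨pvMEq_congr hdiag ?_, by simpa using hp⟩
        intro a b ha hb
        split_ifs <;> first | rfl | omega
      | succ t iht =>
        intro ht
        obtain ⟨im, ip⟩ := iht (by omega)
        rw [List.range_succ, List.foldl_append, List.foldl_cons, List.foldl_nil]
        set stt := (List.range t).foldl (fun st2 j => pvA_fillCell ws st2 k j)
            (pvSet2 st.1 k (n - 1 - k) "X", st.2) with hstt
        simp only [pvA_fillCell]
        constructor
        · refine pvMEq_congr (pvMEq_set im hk (by omega) _) ?_
          intro a b ha hb
          rw [ip]
          by_cases hab : a = k ∧ b = t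
          · obtain ⟨h1, h2⟩ := hab
            subst h1; subst h2
            rw [if_pos ⟨rfl, rfl⟩, if_neg (lt_irrefl a), if_pos rfl,
              if_neg (show ¬ b = n - 1 - a by omega), if_pos (Nat.lt_succ_self b)]
          · rw [if_neg hab]
            split_ifs <;> first | rfl | omega
        · show (stt.2 + 1) % ws.length = _
          rw [ip, pvModSucc]
          ring_nf
    have hfin := inner (n - 1 - k) le_rfl
    simp only [pvA_fillRow]
    constructor
    · refine pvMEq_congr hfin.1 ?_
      intro a b ha hb
      by_cases hak2 : a = k
      · subst hak2
        simp only [pvUpC]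
        split_ifs <;> first | rfl | omega
      · split_ifs <;> first | rfl | omega
    · rw [hfin.2]
      show _ = pvPref n (k + 1) % ws.length
      simp [pvPref]
  -- outer induction
  have outer : ∀ k, k ≤ n →
      pvMEq ((List.range k).foldl (pvA_fillRow n ws)
          (List.replicate n (List.replicate n ""), 0)).1 n
        (fun i j => if i < k then pvUpC n ws i j else "") ∧
      ((List.range k).foldl (pvA_fillRow n ws)
          (List.replicate n (List.replicate n ""), 0)).2 = pvPref n k % ws.length := by
    intro k
    induction k with
    | zero =>
      intro _
      exact ⟨pvMEq_congr (pvMEq_init n) (by intro a b _ _; simp), by simp [pvPref]⟩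
    | succ k ih =>
      intro hk
      obtain ⟨im, ip⟩ := ih (by omega)
      rw [List.range_succ, List.foldl_append, List.foldl_cons, List.foldl_nil]
      exact row k (by omega) _ im ip
  refine pvMEq_congr (outer n le_rfl).1 ?_
  intro a b ha hb
  simp [ha]

-- characterization of the mirror loop
theorem pvUpC_lower (n : Nat) (ws : List String) (a b : Nat) (h : n - 1 - a < b) :
    pvUpC n ws a b = "" := by
  unfold pvUpC
  rw [if_neg (by omega), if_neg (by omega)]

theorem pvUpC_diag (n : Nat) (ws : List String) (a b : Nat) (h : b = n - 1 - a) :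
    pvUpC n ws a b = "X" := by
  unfold pvUpC
  rw [if_pos h]

theorem pvMirC_other (w : String) (h1 : w ≠ "V") (h2 : w ≠ "A") (h3 : w ≠ "X")
    (h4 : w ≠ "O") : pvMirC w = "" := by
  simp [pvMirC, h1, h2, h3, h4]

theorem read_upper (n : Nat) (ws : List String) (i t : Nat) (hle : t ≤ n - 1 - i) :
    pvMidC2 n ws i t i t = pvUpC n ws i t := by
  unfold pvMidC2
  rw [if_neg (by omega)]

theorem read_lower (n : Nat) (ws : List String) (i t : Nat) (hgt : n - 1 - i < t)
    (ht : t < n) : pvMidC2 n ws i t i t = pvMirC (pvUpC n ws (n - 1 - t) (n - 1 - i)) := by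
  unfold pvMidC2
  rw [if_pos ⟨hgt, Or.inl (by omega)⟩]

theorem target_next_of_lt (n : Nat) (ws : List String) (i t : Nat) (hlt : t < n - 1 - i)
    (ht : t < n) :
    pvMidC2 n ws i (t + 1) (n - 1 - t) (n - 1 - i) = pvMirC (pvUpC n ws i t) := by
  have e1 : n - 1 - (n - 1 - t) = t := by omega
  have e2 : n - 1 - (n - 1 - i) = i := by omega
  unfold pvMidC2
  rw [e1, e2, if_pos ⟨by omega, Or.inr ⟨rfl, by omega⟩⟩]

theorem target_eq_of_ge (n : Nat) (ws : List String) (i t : Nat) (hge : n - 1 - i ≤ t)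
    (hi : i < n - 1) (ht : t < n) :
    pvMidC2 n ws i (t + 1) (n - 1 - t) (n - 1 - i) =
      pvMidC2 n ws i t (n - 1 - t) (n - 1 - i) := by
  have e1 : n - 1 - (n - 1 - t) = t := by omega
  have e2 : n - 1 - (n - 1 - i) = i := by omega
  unfold pvMidC2
  rw [e1, e2]
  split_ifs <;> first | rfl | omega

theorem target_cur_of_lt (n : Nat) (ws : List String) (i t : Nat) (hlt : t < n - 1 - i)
    (ht : t < n) : pvMidC2 n ws i t (n - 1 - t) (n - 1 - i) = "" := by
  have e1 : n - 1 - (n - 1 - t) = t := by omega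
  have e2 : n - 1 - (n - 1 - i) = i := by omega
  unfold pvMidC2
  rw [e1, e2, if_neg (by omega)]
  exact pvUpC_lower n ws _ _ (by omega)

theorem target_cur_of_ge (n : Nat) (ws : List String) (i t : Nat) (hge : n - 1 - i ≤ t)
    (hi : i < n - 1) (ht : t < n) :
    pvMidC2 n ws i t (n - 1 - t) (n - 1 - i) = pvUpC n ws (n - 1 - t) (n - 1 - i) := by
  have e1 : n - 1 - (n - 1 - t) = t := by omega
  have e2 : n - 1 - (n - 1 - i) = i := by omega
  unfold pvMidC2
  rw [e1, e2, if_neg (by omega)]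

theorem set_target (n : Nat) (ws : List String) (i t : Nat) (hi : i < n - 1) (ht : t < n)
    (m : List (List String)) (hm : pvMEq m n (pvMidC2 n ws i t)) (v : String)
    (hveq : v = pvMidC2 n ws i (t + 1) (n - 1 - t) (n - 1 - i)) :
    pvMEq (pvSet2 m (n - 1 - t) (n - 1 - i) v) n (pvMidC2 n ws i (t + 1)) := by
  refine pvMEq_congr (pvMEq_set hm (by omega) (by omega) v) ?_
  intro a b ha hb
  by_cases hab : a = n - 1 - t ∧ b = n - 1 - i
  · obtain ⟨h1, h2⟩ := hab
    subst h1; subst h2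
    rw [if_pos ⟨rfl, rfl⟩, hveq]
  · rw [if_neg hab]
    unfold pvMidC2
    split_ifs <;> first | rfl | omega

theorem nochange_target (n : Nat) (ws : List String) (i t : Nat) (hi : i < n - 1)
    (ht : t < n) (m : List (List String)) (hm : pvMEq m n (pvMidC2 n ws i t))
    (hsame : pvMidC2 n ws i t (n - 1 - t) (n - 1 - i) =
      pvMidC2 n ws i (t + 1) (n - 1 - t) (n - 1 - i)) :
    pvMEq m n (pvMidC2 n ws i (t + 1)) := by
  refine pvMEq_congr hm ?_
  intro a b ha hb
  by_cases hab : a = n - 1 - t ∧ b = n - 1 - i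
  · obtain ⟨h1, h2⟩ := hab
    subst h1; subst h2
    exact hsame
  · unfold pvMidC2
    split_ifs <;> first | rfl | omega

theorem mirror_step (n : Nat) (ws : List String) (i t : Nat) (hi : i < n - 1) (ht : t < n)
    (m : List (List String)) (hm : pvMEq m n (pvMidC2 n ws i t)) :
    pvMEq (pvA_mirrorStep n m i t) n (pvMidC2 n ws i (t + 1)) := by
  have hread : pvGet2 m i t = pvMidC2 n ws i t i t := hm.2.2 i t (by omega) ht
  simp only [pvA_mirrorStep]
  rw [hread]
  rcases Nat.lt_trichotomy t (n - 1 - i) with hA | hB | hC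
  · -- strictly upper source cell: a pattern word w
    rw [read_upper n ws i t (by omega)]
    set w := pvUpC n ws i t with hw
    by_cases h1 : w = "V"
    · rw [if_pos h1]
      exact set_target n ws i t hi ht m hm _
        (by rw [target_next_of_lt n ws i t hA ht, ← hw, h1]; decide)
    · rw [if_neg h1]
      by_cases h2 : w = "A"
      · rw [if_pos h2]
        exact set_target n ws i t hi ht m hm _
          (by rw [target_next_of_lt n ws i t hA ht, ← hw, h2]; decide)
      · rw [if_neg h2]
        by_cases h3 : w = "X"
        · rw [if_pos h3]
          exact set_target n ws i t hi ht m hm _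
            (by rw [target_next_of_lt n ws i t hA ht, ← hw, h3]; decide)
        · rw [if_neg h3]
          by_cases h4 : w = "O"
          · rw [if_pos h4]
            exact set_target n ws i t hi ht m hm _
              (by rw [target_next_of_lt n ws i t hA ht, ← hw, h4]; decide)
          · rw [if_neg h4]
            refine nochange_target n ws i t hi ht m hm ?_
            rw [target_cur_of_lt n ws i t hA ht, target_next_of_lt n ws i t hA ht,
              ← hw, pvMirC_other w h1 h2 h3 h4]
  · -- diagonal source cell: always 'X'
    rw [read_upper n ws i t (by omega), pvUpC_diag n ws i t (by omega)]
    rw [if_neg (by decide), if_neg (by decide), if_pos rfl]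
    refine set_target n ws i t hi ht m hm _ ?_
    rw [target_eq_of_ge n ws i t (by omega) hi ht, target_cur_of_ge n ws i t (by omega) hi ht]
    rw [pvUpC_diag n ws (n - 1 - t) (n - 1 - i) (by omega)]
  · -- lower source cell: already the mirror of its upper source w
    rw [read_lower n ws i t hC ht]
    set w := pvUpC n ws (n - 1 - t) (n - 1 - i) with hw
    have hcur := target_cur_of_ge n ws i t (by omega) hi ht
    have hnext := target_eq_of_ge n ws i t (by omega) hi ht
    by_cases h1 : w = "V"
    · rw [h1]
      rw [if_neg (by decide), if_pos (by decide)]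
      exact set_target n ws i t hi ht m hm _ (by rw [hnext, hcur, ← hw, h1])
    · by_cases h2 : w = "A"
      · rw [h2]
        rw [if_pos (by decide)]
        exact set_target n ws i t hi ht m hm _ (by rw [hnext, hcur, ← hw, h2])
      · by_cases h3 : w = "X"
        · rw [h3]
          rw [if_neg (by decide), if_neg (by decide), if_pos (by decide)]
          exact set_target n ws i t hi ht m hm _ (by rw [hnext, hcur, ← hw, h3])
        · by_cases h4 : w = "O"
          · rw [h4]
            rw [if_neg (by decide), if_neg (by decide), if_neg (by decide),
              if_pos (by decide)]
            exact set_target n ws i t hi ht m hm _ (by rw [hnext, hcur, ← hw, h4])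
          · rw [pvMirC_other w h1 h2 h3 h4]
            rw [if_neg (by decide), if_neg (by decide), if_neg (by decide),
              if_neg (by decide)]
            exact nochange_target n ws i t hi ht m hm hnext.symm

theorem mirror_char (n : Nat) (ws : List String)
    (hL : 0 < ws.length ∨ n ≤ 1) :
    pvMEq ((List.range (n - 1)).foldl (fun m i => pvA_mirrorRow n m i) (create_matrix n ws))
      n (pvFinC n ws) := by
  -- one full row of the mirror loop
  have row : ∀ i, i < n - 1 → ∀ m, pvMEq m n (pvMidC2 n ws i 0) →
      pvMEq (pvA_mirrorRow n m i) n (pvMidC2 n ws i n) := by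
    intro i hi m hm
    unfold pvA_mirrorRow
    have inner : ∀ t, t ≤ n →
        pvMEq ((List.range t).foldl (fun m j => pvA_mirrorStep n m i j) m) n
          (pvMidC2 n ws i t) := by
      intro t
      induction t with
      | zero => intro _; simpa using hm
      | succ t iht =>
        intro htn
        rw [List.range_succ, List.foldl_append, List.foldl_cons, List.foldl_nil]
        exact mirror_step n ws i t hi (by omega) _ (iht (by omega))
    exact inner n le_rfl
  -- outer loop over rows 0..n-2
  have outer : ∀ k, k ≤ n - 1 →
      pvMEq ((List.range k).foldl (fun m i => pvA_mirrorRow n m i) (create_matrix n ws)) n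
        (pvMidC n ws k) := by
    intro k
    induction k with
    | zero =>
      intro _
      refine pvMEq_congr (create_matrix_char n ws hL) ?_
      intro a b ha hb
      unfold pvMidC
      split_ifs <;> first | rfl | omega
    | succ k ih =>
      intro hk
      rw [List.range_succ, List.foldl_append, List.foldl_cons, List.foldl_nil]
      have h0 : pvMEq ((List.range k).foldl (fun m i => pvA_mirrorRow n m i)
          (create_matrix n ws)) n (pvMidC2 n ws k 0) := by
        refine pvMEq_congr (ih (by omega)) ?_
        intro a b ha hb
        unfold pvMidC pvMidC2
        split_ifs <;> first | rfl | omega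
      refine pvMEq_congr (row k (by omega) _ h0) ?_
      intro a b ha hb
      unfold pvMidC pvMidC2
      split_ifs <;> first | rfl | omega
  refine pvMEq_congr (outer (n - 1) le_rfl) ?_
  intro a b ha hb
  unfold pvMidC pvFinC
  split_ifs <;> first | rfl | omega

-- rows of a characterized matrix
theorem pvMEq_row {m : List (List String)} {n : Nat} {f : Nat → Nat → String}
    (h : pvMEq m n f) {i : Nat} (hi : i < n) :
    m.getD i [] = (List.range n).map (f i) := by
  apply List.ext_getElem
  · simp only [List.length_map, List.length_range]
    exact h.2.1 i hi
  · intro j hj1 hj2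
    have hjn : j < n := (h.2.1 i hi) ▸ hj1
    have hv := h.2.2 i j hi hjn
    unfold pvGet2 at hv
    rw [List.getD_eq_getElem?_getD, List.getElem?_eq_getElem hj1] at hv
    simpa [hjn] using hv

-- closed form for the pattern prefix, over Int
theorem pvPref_closed (n : Nat) : ∀ i : Nat, i ≤ n →
    (pvPref n i : Int) = (i : Int) * ((n : Int) - 1)
      - PySem.Int.floordiv ((i : Int) * ((i : Int) - 1)) 2 := by
  have key : ∀ i : Nat, i ≤ n →
      2 * (pvPref n i : Int) = (i : Int) * (2 * (n : Int) - 2) - (i : Int) * ((i : Int) - 1) := by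
    intro i
    induction i with
    | zero => intro _; simp [pvPref]
    | succ k ih =>
      intro hk
      have hk' : k ≤ n := by omega
      have h2 := ih hk'
      have hcast : ((n - 1 - k : Nat) : Int) = (n : Int) - 1 - (k : Int) := by omega
      show 2 * ((pvPref n k + (n - 1 - k) : Nat) : Int) = _
      push_cast [hcast]
      linear_combination h2
  intro i hi
  have h2 := key i hi
  have hdvd : PySem.Int.floordiv ((i : Int) * ((i : Int) - 1)) 2 = ((i : Int) * ((i : Int) - 1)) / 2 :=
    PySem.Int.floordiv_eq_ediv_of_pos (by norm_num)
  rw [hdvd]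
  have hr : (i : Int) * (2 * (n : Int) - 2) = 2 * ((i : Int) * ((n : Int) - 1)) := by ring
  rw [hr] at h2
  omega


-- the dict literal's lookup is the elif-chain's write value
theorem mirror_getD (s : String) : pvB_mirror.getD s "" = pvMirC s := by
  unfold pvMirC
  split_ifs with h1 h2 h3 h4 <;> first | (subst_vars; decide) | skip
  have e1 : ("V" == s) = false := beq_eq_false_iff_ne.mpr fun h => h1 h.symm
  have e2 : ("A" == s) = false := beq_eq_false_iff_ne.mpr fun h => h2 h.symm
  have e3 : ("X" == s) = false := beq_eq_false_iff_ne.mpr fun h => h3 h.symm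
  have e4 : ("O" == s) = false := beq_eq_false_iff_ne.mpr fun h => h4 h.symm
  simp [pvB_mirror, PySem.Dict.getD, PySem.Dict.get?, List.find?, e1, e2, e3, e4]

-- B's upper() equals A's upper-triangle cell
theorem upper_agree (ws : List String) (n : Nat)
    (hL : 0 < ws.length ∨ n ≤ 1) (i j : Nat) (hi : i < n) (hj : j ≤ n - 1 - i) :
    pvB_upper ws ((n : Int)) (i : Int) (j : Int) = pvUpC n ws i j := by
  unfold pvB_upper pvUpC
  by_cases hd : j = n - 1 - i
  · rw [if_pos (by omega), if_pos hd]
  · rw [if_neg (by omega), if_neg hd, if_pos (by omega)]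
    have hL' : 0 < ws.length := by rcases hL with h | h; exact h; omega
    rw [← pvPref_closed n i (by omega), ← Nat.cast_add, PySem.Int.mod_natCast]
    simp only [PySem.List.pyGet?_natCast]
    rfl

-- B's cell() equals A's final matrix cell
theorem cell_agree (ws : List String) (ordo : Int) (n : Nat) (hn : (n : Int) = ordo)
    (hL : 0 < ws.length ∨ n ≤ 1) (i j : Nat) (hi : i < n) (hj : j < n) :
    pvB_cell ws ordo (i : Int) (j : Int) = pvFinC n ws i j := by
  subst hn
  unfold pvB_cell pvFinC
  by_cases hup : j ≤ n - 1 - i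
  · rw [if_pos (by omega), if_neg (by omega)]
    exact upper_agree ws n hL i j hi hup
  · rw [if_neg (by omega), if_pos (by omega)]
    have e1 : (n : Int) - 1 - (j : Int) = ((n - 1 - j : Nat) : Int) := by omega
    have e2 : (n : Int) - 1 - (i : Int) = ((n - 1 - i : Nat) : Int) := by omega
    rw [e1, e2, upper_agree ws n hL (n - 1 - j) (n - 1 - i) (by omega) (by omega),
      mirror_getD]

theorem pvFoldlAppend : ∀ (xs : List String) (init : String),
    xs.foldl (· ++ ·) init = init ++ xs.foldl (· ++ ·) "" := by
  intro xs
  induction xs with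
  | nil => intro init; simp
  | cons y ys ih =>
    intro init
    simp only [List.foldl_cons]
    rw [ih (init ++ y), ih ("" ++ y), String.append_assoc]
    simp

theorem pvJoinCons (x : String) (xs : List String) :
    String.join (x :: xs) = x ++ String.join xs := by
  simp only [String.join, List.foldl_cons]
  rw [pvFoldlAppend xs ("" ++ x)]
  simp

-- string assembly: a fold appending g i for i in a list equals join of the mapped list
theorem foldl_append_join (g : Nat → String) :
    ∀ (l : List Nat) (init : String),
      l.foldl (fun s i => s ++ g i) init = init ++ String.join (l.map g) := by
  intro l
  induction l with
  | nil => intro init; simp [String.join]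
  | cons x xs ih =>
    intro init
    simp only [List.foldl_cons, List.map_cons, ih, pvJoinCons, String.append_assoc]

theorem input_to_mirror_eq (string_data : String) (ordo : Int)
    (hPre : Pre_input_to_mirror string_data ordo) :
    input_to_mirror string_data ordo = input_to_mirror_alt string_data ordo := by
  by_cases hpos : 0 < ordo
  · set ws := PySem.Str.split₀ string_data with hws
    set n := ordo.toNat with hn0
    have hn : (n : Int) = ordo := Int.toNat_of_nonneg (by omega)
    have hL : 0 < ws.length ∨ n ≤ 1 := by
      rcases hPre with h | h
      · right; omega
      · left
        rw [hws]
        exact List.length_pos_of_ne_nil h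
    have hfin := mirror_char n ws hL
    unfold input_to_mirror input_to_mirror_alt
    dsimp only
    rw [← hws, ← hn0]
    set M := (List.range (n - 1)).foldl (fun m i => pvA_mirrorRow n m i) (create_matrix n ws)
      with hM
    rw [hfin.1]
    have hbody : (fun (s : String) (i : Nat) => s ++ PySem.Str.join " " (M.getD i []) ++ " ")
        = fun (s : String) (i : Nat) => s ++ (PySem.Str.join " " (M.getD i []) ++ " ") := by
      funext s i
      rw [String.append_assoc]
    rw [hbody, foldl_append_join]
    rw [String.empty_append]
    -- B's ranges become List.range n
    rw [PySem.List.pyRange_one]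
    simp only [Int.sub_zero, hn0, List.map_map]
    congr 1
    apply List.map_congr_left
    intro i hi
    have hin : i < n := List.mem_range.mp hi
    simp only [Function.comp, zero_add]
    rw [pvMEq_row hfin hin, ← hn0]
    congr 2
    apply List.map_congr_left
    intro j hj
    have hjn : j < n := List.mem_range.mp hj
    simp only [Function.comp, zero_add]
    exact (cell_agree ws ordo n hn hL i j hin hjn).symm
  · -- ordo ≤ 0: both sides are the empty string
    have h0 : ordo.toNat = 0 := Int.toNat_of_nonpos (by omega)
    unfold input_to_mirror input_to_mirror_alt create_matrix
    rw [PySem.List.pyRange_one_eq_nil (by omega)]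
    simp [h0, String.join]

-- ===== VERDICT (by name: the statement is the Claim_ definition above) =====
theorem input_to_mirror_spec : Claim_equal_input_to_mirror := by
  intro string_data ordo _hDom hPre
  exact input_to_mirror_eq string_data ordo hPre
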